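-- pv_equiv track=rewrite | github.com/jesusgollonet/browser.engineering | browser/browser.py | parse
-- ===== SOURCE A (Python) =====
-- def parse(body, view_source=False):
--     if view_source:
--         body = body.replace("<", "&lt;").replace(">", "&gt;")
--     in_tag = False
--     output = ""
--     for c in body:
--         if c == "<":
--             in_tag = True
--         elif c == ">":
--             in_tag = False
--         elif not in_tag:
--             output += c
--
--     output = output.replace("&lt;", "<").replace("&gt;", ">")
--     return output
-- ===== SOURCE B (Python) =====
-- def parse(body, view_source=False):
--     if view_source:
--         body = body.replace("<", "&lt;").replace(">", "&gt;")
--     pieces = body.split("<")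
--     # text before the first tag (stray '>' dropped), then for each piece after a
--     # '<' drop everything up to and including the first '>' (all of it if none).
--     texts = ["".join(pieces[0].split(">"))] + \
--             ["".join(p.split(">")[1:]) for p in pieces[1:]]
--     output = "".join(texts)
--     return output.replace("&lt;", "<").replace("&gt;", ">")
-- ===== Notes on version B (the rewrite author's own statement) =====
-- stated objective: idiomatic
-- what changed: Replaced the per-character in_tag state machine with string splitting: split the body on the tag-open character, keep the leading text and, for each later piece, the part after its first tag-close character (splitting on it also drops stray close characters), then join and apply the same entity replacements.
import Mathlib
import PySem

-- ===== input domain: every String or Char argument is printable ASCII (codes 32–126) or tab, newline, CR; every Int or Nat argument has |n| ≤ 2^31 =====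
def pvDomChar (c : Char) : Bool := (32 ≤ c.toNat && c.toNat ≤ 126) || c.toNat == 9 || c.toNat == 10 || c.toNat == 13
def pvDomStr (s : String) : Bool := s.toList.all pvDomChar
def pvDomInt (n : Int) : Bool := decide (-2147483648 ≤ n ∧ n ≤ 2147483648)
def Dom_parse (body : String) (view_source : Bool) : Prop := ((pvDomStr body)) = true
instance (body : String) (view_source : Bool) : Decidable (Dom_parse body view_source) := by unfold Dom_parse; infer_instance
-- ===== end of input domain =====

-- B strips tags by splitting the body with the string built-ins instead of A.s per-character in_tag loop (idiomatic; measurably faster constant factor).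

-- ===== PORT A =====
def parse (body : String) (view_source : Bool) : String :=
  let body := if view_source then
      PySem.Str.replace (PySem.Str.replace body "<" "&lt;") ">" "&gt;"
    else body
  -- for c in body: per-character state machine over (in_tag, output)
  let st := body.toList.foldl (fun (s : Bool × List Char) c =>
      if c = '<' then (true, s.2)
      else if c = '>' then (false, s.2)
      else if s.1 = false then (s.1, s.2 ++ [c])
      else s) (false, ([] : List Char))
  let output := String.ofList st.2
  PySem.Str.replace (PySem.Str.replace output "&lt;" "<") "&gt;" ">"

-- ===== PORT B =====
def parse_alt (body : String) (view_source : Bool) : String :=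
  let body := if view_source then
      PySem.Str.replace (PySem.Str.replace body "<" "&lt;") ">" "&gt;"
    else body
  let pieces := PySem.Chars.splitOn body.toList ['<']
  -- ["".join(pieces[0].split(">"))] + ["".join(p.split(">")[1:]) for p in pieces[1:]]
  let texts := PySem.Chars.join [] (PySem.Chars.splitOn (PySem.List.pyGetD pieces 0 []) ['>'])
      :: (PySem.List.slice pieces (some 1) none).map
          (fun p => PySem.Chars.join [] (PySem.List.slice (PySem.Chars.splitOn p ['>']) (some 1) none))
  let output := PySem.Chars.join [] texts
  PySem.Str.replace (PySem.Str.replace (String.ofList output) "&lt;" "<") "&gt;" ">"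

-- ===== PRECONDITION & SPEC =====
def Spec_parse (body : String) (view_source : Bool) (out : String) : Prop := out = parse_alt body view_source
instance (body : String) (view_source : Bool) (out : String) : Decidable (Spec_parse body view_source out) := by unfold Spec_parse; infer_instance

-- ===== CLAIM (what is proved, stated in full; the proofs are below) =====
def Claim_equal_parse : Prop := ∀ (body : String) (view_source : Bool), Dom_parse body view_source → Spec_parse body view_source (parse body view_source)

-- ===== LEMMAS AND PROOFS =====

-- structural version of split on a one-character separator
def split1 (x : Char) : List Char → List (List Char)
  | [] => [[]]
  | c :: cs =>
    if c = x then [] :: split1 x cs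
    else match split1 x cs with
      | [] => [[c]]
      | h :: t => (c :: h) :: t

-- functional version of A's state machine
def stripF : Bool → List Char → List Char
  | _, [] => []
  | b, c :: cs =>
    if c = '<' then stripF true cs
    else if c = '>' then stripF false cs
    else if b then stripF true cs
    else c :: stripF false cs

-- what B keeps from a piece that follows a '<'
def tagPiece (p : List Char) : List Char := ((split1 '>' p).tail).flatten

theorem split1_ne_nil (x : Char) (s : List Char) : split1 x s ≠ [] := by
  cases s with
  | nil => simp [split1]
  | cons c cs =>
    simp only [split1]
    split
    · simp
    · split <;> simp

theorem split1_cons_exists (x : Char) (s : List Char) : ∃ h t, split1 x s = h :: t := by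
  cases hs : split1 x s with
  | nil => exact absurd hs (split1_ne_nil _ _)
  | cons a b => exact ⟨a, b, rfl⟩

theorem go_single (x : Char) : ∀ (s : List Char) (fuel : Nat) (cur : List Char) (acc : List (List Char)),
    s.length < fuel →
    PySem.Chars.splitOn.go [x] fuel s cur acc
      = acc.reverse ++ (cur.reverse ++ (split1 x s).headD []) :: (split1 x s).tail := by
  intro s
  induction s with
  | nil =>
    intro fuel cur acc hf
    cases fuel with
    | zero => omega
    | succ f => simp [PySem.Chars.splitOn.go, split1]
  | cons c cs ih =>
    intro fuel cur acc hf
    cases fuel with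
    | zero => simp at hf
    | succ f =>
      simp only [PySem.Chars.splitOn.go]
      by_cases h : c = x
      · subst h
        rw [if_pos (by simp [List.isPrefixOf])]
        simp only [List.length_cons] at hf
        simp only [List.length_singleton, List.drop_succ_cons, List.drop_zero]
        rw [ih f [] ((cur.reverse) :: acc) (by omega)]
        simp only [split1]
        obtain ⟨h0, t0, h01⟩ := split1_cons_exists c cs
        simp [h01]
      · rw [if_neg (by simp [List.isPrefixOf]; exact fun hh => h hh.symm)]
        simp only [List.length_cons] at hf
        rw [ih f (c :: cur) acc (by omega)]
        simp only [split1, if_neg h]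
        obtain ⟨h0, t0, h01⟩ := split1_cons_exists x cs
        simp [h01]

theorem splitOn_single (x : Char) (s : List Char) : PySem.Chars.splitOn s [x] = split1 x s := by
  rw [PySem.Chars.splitOn, go_single x s (s.length+1) [] [] (by omega)]
  obtain ⟨h0, t0, h01⟩ := split1_cons_exists x s
  simp [h01]

theorem join_nil_flatten (parts : List (List Char)) : PySem.Chars.join [] parts = parts.flatten := by
  rw [PySem.Chars.join]
  induction parts with
  | nil => rfl
  | cons h t ih =>
    cases t with
    | nil => simp [List.intercalate]
    | cons h2 t2 =>
      simp only [List.intercalate, List.intersperse, List.flatten_cons] at *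
      simp [ih]

theorem foldl_machine : ∀ (cs : List Char) (b : Bool) (out : List Char),
    (cs.foldl (fun (s : Bool × List Char) c =>
      if c = '<' then (true, s.2)
      else if c = '>' then (false, s.2)
      else if s.1 = false then (s.1, s.2 ++ [c])
      else s) (b, out)).2 = out ++ stripF b cs := by
  intro cs
  induction cs with
  | nil => intro b out; simp [stripF]
  | cons c cs ih =>
    intro b out
    simp only [List.foldl_cons, stripF]
    by_cases h1 : c = '<'
    · simp [h1, ih]
    · by_cases h2 : c = '>'
      · simp [h2, ih]
      · cases b with
        | false => simp [h1, h2, ih]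
        | true => simp [h2, ih]

theorem strip_split : ∀ cs : List Char,
    stripF false cs = (split1 '>' ((split1 '<' cs).headD [])).flatten
        ++ (((split1 '<' cs).tail).map tagPiece).flatten
      ∧ stripF true cs = ((split1 '<' cs).map tagPiece).flatten := by
  intro cs
  induction cs with
  | nil => simp [stripF, split1, tagPiece]
  | cons c cs ih =>
    obtain ⟨ihf, iht⟩ := ih
    by_cases h1 : c = '<'
    · subst h1
      constructor
      · simp only [stripF, split1]
        simpa [tagPiece, split1] using iht
      · simp only [stripF, split1]
        simpa [tagPiece, split1] using iht
    · by_cases h2 : c = '>'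
      · subst h2
        have hlt : ('>' : Char) ≠ '<' := by decide
        obtain ⟨h, t, hht⟩ := split1_cons_exists '<' cs
        constructor
        · simp only [stripF, if_neg hlt]
          rw [ihf]
          simp only [split1, if_neg hlt, hht]
          simp [split1]
        · simp only [stripF, if_neg hlt]
          rw [ihf]
          simp only [split1, if_neg hlt, hht]
          simp [tagPiece, split1]
      · obtain ⟨h, t, hht⟩ := split1_cons_exists '<' cs
        obtain ⟨h0, t0, hht0⟩ := split1_cons_exists '>' h
        constructor
        · simp only [stripF, if_neg h1, if_neg h2]
          rw [ihf, hht]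
          simp only [List.headD, List.tail, split1, if_neg h1, if_neg h2, hht, hht0]
          simp [hht0]
        · simp only [stripF, if_neg h1, if_neg h2]
          rw [iht, hht]
          simp only [split1, if_neg h1, if_neg h2, hht, List.map_cons, List.flatten_cons]
          have : tagPiece (c :: h) = tagPiece h := by
            simp only [tagPiece, split1, if_neg h2, hht0]
            simp
          simp [this]

theorem core_eq (L : List Char) :
    (L.foldl (fun (s : Bool × List Char) c =>
      if c = '<' then (true, s.2)
      else if c = '>' then (false, s.2)
      else if s.1 = false then (s.1, s.2 ++ [c])
      else s) (false, ([] : List Char))).2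
    = PySem.Chars.join []
        (PySem.Chars.join [] (PySem.Chars.splitOn (PySem.List.pyGetD (PySem.Chars.splitOn L ['<']) 0 []) ['>'])
          :: (PySem.List.slice (PySem.Chars.splitOn L ['<']) (some 1) none).map
              (fun p => PySem.Chars.join [] (PySem.List.slice (PySem.Chars.splitOn p ['>']) (some 1) none))) := by
  rw [foldl_machine L false []]
  obtain ⟨h, t, hht⟩ := split1_cons_exists '<' L
  rw [splitOn_single '<' L, hht]
  have hget : PySem.List.pyGetD (h :: t) 0 [] = h := by
    simp [PySem.List.pyGetD, PySem.List.pyIdx?]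
  have hslice : PySem.List.slice (h :: t) (some 1) none = t := by
    rw [PySem.List.slice_from _ (by omega)]
    simp
  rw [hget, hslice, join_nil_flatten]
  have hmap : ∀ p : List Char,
      PySem.Chars.join [] (PySem.List.slice (PySem.Chars.splitOn p ['>']) (some 1) none)
        = tagPiece p := by
    intro p
    rw [splitOn_single '>' p, PySem.List.slice_from _ (by omega), join_nil_flatten]
    simp [tagPiece, List.drop_one]
  simp only [hmap]
  rw [splitOn_single '>' h, join_nil_flatten]
  have := (strip_split L).1
  rw [hht] at this
  simpa using this

-- ===== VERDICT (by name: the statement is the Claim_ definition above) =====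
theorem parse_spec : Claim_equal_parse := by
  intro body view_source _
  unfold Spec_parse parse parse_alt
  simp only []
  rw [core_eq]
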